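-- pv_equiv track=rewrite | github.com/nikitayusupov/differential-geometry | Практикум 2/solution (1).py | _is_oriented
-- ===== SOURCE A (Python) =====
-- def _is_oriented(graph):
--     res = 1
--     n = len(graph)
--     for u in range(n):
--         for v in range(u + 1, n):
--             if graph[u][v] + graph[v][u] == 0:
--                 continue
--             if not graph[u][v] or not graph[v][u]:
--                 res = 0
--     return bool(res)
-- ===== SOURCE B (Python) =====
-- def _is_oriented(graph):
--     n = len(graph)
--     M = [[bool(graph[i][j]) for j in range(n)] for i in range(n)]
--     return M == [[M[j][i] for j in range(n)] for i in range(n)]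
-- ===== Notes on version B (the rewrite author's own statement) =====
-- stated objective: idiomatic
-- what changed: Replaces the u<v nested loop with continue/flag logic by building the booleanized presence matrix once and comparing it with its transpose.
-- outside the precondition, e.g. on _is_oriented([[0, 1], [1]]): A returns True, B raises IndexError; on _is_oriented([[]]): A returns True, B raises IndexError
import Mathlib
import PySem

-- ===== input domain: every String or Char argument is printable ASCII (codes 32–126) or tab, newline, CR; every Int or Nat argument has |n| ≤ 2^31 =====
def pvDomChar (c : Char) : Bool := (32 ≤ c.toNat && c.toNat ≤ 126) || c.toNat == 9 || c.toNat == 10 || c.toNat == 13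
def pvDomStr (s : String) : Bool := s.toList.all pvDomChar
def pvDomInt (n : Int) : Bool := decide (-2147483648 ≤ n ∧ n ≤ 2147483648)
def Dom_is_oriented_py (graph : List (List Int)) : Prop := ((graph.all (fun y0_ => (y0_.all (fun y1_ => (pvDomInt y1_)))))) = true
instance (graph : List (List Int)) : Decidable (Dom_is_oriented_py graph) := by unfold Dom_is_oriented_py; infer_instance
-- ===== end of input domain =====

-- B builds the booleanized presence matrix and compares it with its transpose (idiomatic restructuring; same O(n^2) cost).


-- ===== PORT A =====
def is_oriented_py (graph : List (List Int)) : Bool :=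
  let n : Int := graph.length
  let res : Int :=
    (PySem.List.pyRange 0 n 1).foldl (fun res u =>
      (PySem.List.pyRange (u + 1) n 1).foldl (fun res v =>
        let guv := PySem.List.pyGetD (PySem.List.pyGetD graph u []) v 0
        let gvu := PySem.List.pyGetD (PySem.List.pyGetD graph v []) u 0
        if guv + gvu == 0 then res
        else if guv == 0 || gvu == 0 then 0 else res) res) 1
  res != 0

-- ===== PORT B =====
def is_oriented_py_alt (graph : List (List Int)) : Bool :=
  let n : Int := graph.length
  let M : List (List Bool) :=
    (PySem.List.pyRange 0 n 1).map (fun i =>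
      (PySem.List.pyRange 0 n 1).map (fun j =>
        PySem.List.pyGetD (PySem.List.pyGetD graph i []) j 0 != 0))
  let T : List (List Bool) :=
    (PySem.List.pyRange 0 n 1).map (fun i =>
      (PySem.List.pyRange 0 n 1).map (fun j =>
        PySem.List.pyGetD (PySem.List.pyGetD M j []) i false))
  M == T

-- ===== PRECONDITION & SPEC =====
-- Pre_ excludes matrices with a row shorter than n (IndexError territory): B reads the whole n×n block and
-- raises there, while A (which never reads the diagonal or the tail of the last row) raises on most of them
-- but happens to return on a few (e.g. a last row of length n-1, or [[]]).
def Pre_is_oriented_py (graph : List (List Int)) : Prop :=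
  ∀ row ∈ graph, graph.length ≤ row.length
instance (graph : List (List Int)) : Decidable (Pre_is_oriented_py graph) := by
  unfold Pre_is_oriented_py; infer_instance
def pvWitness_is_oriented_py : List (List Int) := [[0, 1], [1, 0]]
def Spec_is_oriented_py (graph : List (List Int)) (out : Bool) : Prop := out = is_oriented_py_alt graph
instance (graph : List (List Int)) (out : Bool) : Decidable (Spec_is_oriented_py graph out) := by unfold Spec_is_oriented_py; infer_instance

-- ===== CLAIM (what is proved, stated in full; the proofs are below) =====
def Claim_equal_is_oriented_py : Prop := ∀ (graph : List (List Int)), Dom_is_oriented_py graph → Pre_is_oriented_py graph → Spec_is_oriented_py graph (is_oriented_py graph)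

-- ===== LEMMAS AND PROOFS =====

-- the (u,v) entry as both ports read it (proof-side abbreviation only)
def pvE (graph : List (List Int)) (u v : Int) : Int :=
  PySem.List.pyGetD (PySem.List.pyGetD graph u []) v 0

theorem pvE_eq (graph : List (List Int)) (u v : Int) :
    PySem.List.pyGetD (PySem.List.pyGetD graph u []) v 0 = pvE graph u v := rfl

-- A's pair test fires exactly when the booleanized entries disagree
theorem pv_trigger_bool (a b : Int) :
    (if a + b == 0 then false else (a == 0 || b == 0)) = ((a != 0) != (b != 0)) := by
  by_cases h : a + b = 0 <;> rcases hA : (a == 0) <;> rcases hB : (b == 0) <;>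
    simp_all [bne]

-- a fold that only ever zeroes the flag computes "any trigger"
theorem pv_foldl_flag {α : Type} (l : List α) (t : α → Bool) (r : Int) :
    l.foldl (fun res v => if t v then 0 else res) r = if l.any t then 0 else r := by
  induction l generalizing r with
  | nil => simp
  | cons x xs ih => simp only [List.foldl_cons, List.any_cons]; by_cases h : t x <;> simp [h, ih]

-- A computes: no pair u < v with differing booleanized entries
theorem pvA_char (graph : List (List Int)) :
    is_oriented_py graph =
      !((PySem.List.pyRange 0 (graph.length : Int) 1).any (fun u =>
        (PySem.List.pyRange (u + 1) (graph.length : Int) 1).any (fun v =>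
          (pvE graph u v != 0) != (pvE graph v u != 0)))) := by
  unfold is_oriented_py
  simp only [pvE_eq]
  have hfun : (fun (res : Int) u =>
      (PySem.List.pyRange (u + 1) (graph.length : Int) 1).foldl (fun res v =>
        if pvE graph u v + pvE graph v u == 0 then res
        else if pvE graph u v == 0 || pvE graph v u == 0 then 0 else res) res)
      = (fun (res : Int) u =>
        if (PySem.List.pyRange (u + 1) (graph.length : Int) 1).any (fun v =>
          (pvE graph u v != 0) != (pvE graph v u != 0)) then 0 else res) := by
    funext res u
    have hg : (fun (res : Int) v =>
        if pvE graph u v + pvE graph v u == 0 then res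
        else if pvE graph u v == 0 || pvE graph v u == 0 then 0 else res)
        = (fun (res : Int) v =>
          if (pvE graph u v != 0) != (pvE graph v u != 0) then 0 else res) := by
      funext res v
      rw [← pv_trigger_bool (pvE graph u v) (pvE graph v u)]
      by_cases h : (pvE graph u v + pvE graph v u == 0) = true <;> simp [h]
    rw [hg, pv_foldl_flag]
  refine (congrArg (fun f => List.foldl f (1 : Int) (PySem.List.pyRange 0 (graph.length : Int) 1) != 0) hfun).trans ?_
  rw [pv_foldl_flag]
  by_cases h : ((PySem.List.pyRange 0 (graph.length : Int) 1).any (fun u =>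
      (PySem.List.pyRange (u + 1) (graph.length : Int) 1).any (fun v =>
        (pvE graph u v != 0) != (pvE graph v u != 0)))) = true <;> simp [h]

-- reading B's presence matrix back at in-range indices
theorem pvM_get (graph : List (List Int)) (j i : Int)
    (hj0 : 0 ≤ j) (hjn : j < (graph.length : Int)) (hi0 : 0 ≤ i) (hin : i < (graph.length : Int)) :
    PySem.List.pyGetD (PySem.List.pyGetD
      ((PySem.List.pyRange 0 (graph.length : Int) 1).map (fun i' =>
        (PySem.List.pyRange 0 (graph.length : Int) 1).map (fun k =>
          PySem.List.pyGetD (PySem.List.pyGetD graph i' []) k 0 != 0))) j ([] : List Bool)) i false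
    = (pvE graph j i != 0) := by
  obtain ⟨jn, rfl⟩ : ∃ k : ℕ, j = (k : Int) := ⟨j.toNat, (Int.toNat_of_nonneg hj0).symm⟩
  obtain ⟨im, rfl⟩ : ∃ k : ℕ, i = (k : Int) := ⟨i.toNat, (Int.toNat_of_nonneg hi0).symm⟩
  rw [PySem.List.pyGetD_map_pyRange _ graph.length jn _ (by exact_mod_cast hjn)]
  rw [PySem.List.pyGetD_map_pyRange _ graph.length im _ (by exact_mod_cast hin)]
  rfl

-- B computes: the booleanized matrix equals its transpose, i.e. all pairs symmetric
theorem pvB_char (graph : List (List Int)) :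
    is_oriented_py_alt graph = true ↔
      ∀ i j : Int, 0 ≤ i → i < (graph.length : Int) → 0 ≤ j → j < (graph.length : Int) →
        (pvE graph i j != 0) = (pvE graph j i != 0) := by
  unfold is_oriented_py_alt
  simp only []
  rw [beq_iff_eq, List.map_eq_map_iff]
  constructor
  · intro hEq i j hi0 hin hj0 hjn
    have h1 := hEq i (PySem.List.mem_pyRange_one.mpr ⟨hi0, hin⟩)
    rw [List.map_eq_map_iff] at h1
    have h2 := h1 j (PySem.List.mem_pyRange_one.mpr ⟨hj0, hjn⟩)
    rw [pvM_get graph j i hj0 hjn hi0 hin] at h2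
    exact h2
  · intro hs i hi
    rw [List.map_eq_map_iff]
    intro j hj
    rw [PySem.List.mem_pyRange_one] at hi hj
    rw [pvM_get graph j i hj.1 hj.2 hi.1 hi.2]
    exact hs i j hi.1 hi.2 hj.1 hj.2

theorem is_oriented_py_spec : Claim_equal_is_oriented_py := by
  intro graph _ _
  unfold Spec_is_oriented_py
  rw [Bool.eq_iff_iff, pvA_char, pvB_char]
  rw [Bool.not_eq_eq_eq_not, Bool.not_true, List.any_eq_false]
  constructor
  · intro hno i j hi0 hin hj0 hjn
    rcases lt_trichotomy i j with h | h | h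
    · have h1 := hno i (PySem.List.mem_pyRange_one.mpr ⟨hi0, hin⟩)
      rw [Bool.not_eq_true, List.any_eq_false] at h1
      have h2 := h1 j (PySem.List.mem_pyRange_one.mpr ⟨by omega, hjn⟩)
      revert h2
      rcases pvE graph i j != 0 <;> rcases pvE graph j i != 0 <;> simp
    · subst h; rfl
    · have h1 := hno j (PySem.List.mem_pyRange_one.mpr ⟨hj0, hjn⟩)
      rw [Bool.not_eq_true, List.any_eq_false] at h1
      have h2 := h1 i (PySem.List.mem_pyRange_one.mpr ⟨by omega, hin⟩)
      revert h2
      rcases pvE graph i j != 0 <;> rcases pvE graph j i != 0 <;> simp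
  · intro hs u hu
    rw [Bool.not_eq_true, List.any_eq_false]
    intro v hv
    rw [PySem.List.mem_pyRange_one] at hu hv
    have := hs u v hu.1 hu.2 (by omega) hv.2
    simp [this]
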